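-- pv_equiv track=rewrite | github.com/ganesh-naiknavare-pst/agreement-generation | backend/markdown2.py | preprocess_table_data
-- ===== SOURCE A (Python) =====
-- from typing import List, Tuple, Optional
--
-- def preprocess_table_data(data: List[List[str]]) -> List[List[str]]:
--     """Preprocess table data to merge grouped rows while keeping the header intact."""
--     if not data:
--         return []
--     header = data[0]
--     merged_data = [header]
--     row_count = len(data)
--     col_count = len(header)
--
--     i = 1
--     while i < row_count:
--         if i + 2 < row_count:
--             merged_row = data[i][:]
--             for col in range(col_count):
--                 if data[i + 1][col] == data[i + 2][col]:
--                     merged_row[col] = data[i][col]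
--                 else:
--                     merged_row[col] = f"{data[i][col]}\n{data[i + 1][col]}\n{data[i + 2][col]}"  # Merge contents
--             merged_data.append(merged_row)
--             i += 3
--         else:
--             merged_data.append(data[i])
--             i += 1
--     return merged_data
-- ===== SOURCE B (Python) =====
-- from typing import List
--
-- def _merge_groups(rows: List[List[str]], k: int) -> List[List[str]]:
--     """Recursively consume rows three at a time; fewer than three are kept verbatim."""
--     if len(rows) < 3:
--         return list(rows)
--     a, b, c = rows[0], rows[1], rows[2]
--     merged = [x if y == z else f"{x}\n{y}\n{z}" for x, y, z in zip(a[:k], b, c)] + a[k:]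
--     return [merged] + _merge_groups(rows[3:], k)
--
-- def preprocess_table_data(data: List[List[str]]) -> List[List[str]]:
--     """Preprocess table data to merge grouped rows while keeping the header intact."""
--     if not data:
--         return []
--     return [data[0]] + _merge_groups(data[1:], len(data[0]))
-- ===== Notes on version B (the rewrite author's own statement) =====
-- stated objective: alternative
-- what changed: Replaces A's index-mutating while loop (counters i, row_count, in-place cell overwrites via range(col_count)) by index-free structural recursion that destructures the tail three rows at a time and builds each merged row by zipping the three rows cell-wise.
import Mathlib
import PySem

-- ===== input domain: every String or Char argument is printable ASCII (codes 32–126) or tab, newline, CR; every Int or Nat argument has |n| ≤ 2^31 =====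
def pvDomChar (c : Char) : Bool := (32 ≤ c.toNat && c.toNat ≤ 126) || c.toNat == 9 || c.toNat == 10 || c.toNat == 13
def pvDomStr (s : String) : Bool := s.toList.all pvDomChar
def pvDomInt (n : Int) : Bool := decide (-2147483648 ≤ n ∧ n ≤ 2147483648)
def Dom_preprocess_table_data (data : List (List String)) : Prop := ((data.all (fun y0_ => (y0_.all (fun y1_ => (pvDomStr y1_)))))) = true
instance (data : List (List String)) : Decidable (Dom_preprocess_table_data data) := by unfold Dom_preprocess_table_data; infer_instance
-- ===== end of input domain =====

-- B replaces A's index-mutating while loop by index-free structural recursion that destructures the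
-- tail three rows at a time and zips the three rows cell-wise; return values agree on Pre_.

-- ===== PORT A =====
-- Indices are Nats that A keeps in range of `data` (i < row_count etc.), so List.getD is exact there;
-- the column reads data[i+1][col] etc. raise IndexError on short rows — excluded by Pre_.
def pvMergeRowA (data : List (List String)) (k i : Nat) : List String :=
  (List.range k).foldl
    (fun row col =>
      row.set col
        (if (data.getD (i+1) []).getD col "" = (data.getD (i+2) []).getD col "" then
          (data.getD i []).getD col ""
        else
          (data.getD i []).getD col "" ++ "\n" ++ (data.getD (i+1) []).getD col "" ++ "\n" ++ (data.getD (i+2) []).getD col ""))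
    (data.getD i [])

def pvLoopA (data : List (List String)) (n k i : Nat) (acc : List (List String)) :
    List (List String) :=
  if i < n then
    if i + 2 < n then
      pvLoopA data n k (i + 3) (acc ++ [pvMergeRowA data k i])
    else
      pvLoopA data n k (i + 1) (acc ++ [data.getD i []])
  else acc
termination_by n - i
decreasing_by all_goals omega

def preprocess_table_data (data : List (List String)) : List (List String) :=
  match data with
  | [] => []
  | header :: _ => pvLoopA data data.length header.length 1 [header]

-- ===== PORT B =====
-- zip of three lists truncates to the shortest, exactly as Python's zip; a[:k]/a[k:] are take/drop.
def pvMergeRowB (a b c : List String) (k : Nat) : List String :=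
  (((a.take k).zip (b.zip c)).map
    (fun p => if p.2.1 = p.2.2 then p.1 else p.1 ++ "\n" ++ p.2.1 ++ "\n" ++ p.2.2))
  ++ a.drop k

def pvMergeGroupsB (rows : List (List String)) (k : Nat) : List (List String) :=
  match rows with
  | a :: b :: c :: rest => pvMergeRowB a b c k :: pvMergeGroupsB rest k
  | _ => rows

def preprocess_table_data_alt (data : List (List String)) : List (List String) :=
  match data with
  | [] => []
  | header :: rest => header :: pvMergeGroupsB rest header.length

-- ===== PRECONDITION & SPEC =====
-- Pre_ excludes exactly the inputs on which A raises IndexError: a row inside a full group of three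
-- shorter than the header (column indexing data[i+..][col] for col in range(len(header)) fails there).
def Pre_preprocess_table_data (data : List (List String)) : Prop :=
  ∀ i < data.length, i % 3 = 1 → i + 2 < data.length →
    (data.headD []).length ≤ (data.getD i []).length ∧
    (data.headD []).length ≤ (data.getD (i+1) []).length ∧
    (data.headD []).length ≤ (data.getD (i+2) []).length
instance (data : List (List String)) : Decidable (Pre_preprocess_table_data data) := by
  unfold Pre_preprocess_table_data; infer_instance

def pvWitness_preprocess_table_data : List (List String) :=
  [["h1", "h2"], ["a", "b"], ["c", "d"], ["c", "e"], ["x", "y"]]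

def Spec_preprocess_table_data (data : List (List String)) (out : List (List String)) : Prop := out = preprocess_table_data_alt data
instance (data : List (List String)) (out : List (List String)) : Decidable (Spec_preprocess_table_data data out) := by unfold Spec_preprocess_table_data; infer_instance

-- ===== CLAIM (what is proved, stated in full; the proofs are below) =====
def Claim_equal_preprocess_table_data : Prop := ∀ (data : List (List String)), Dom_preprocess_table_data data → Pre_preprocess_table_data data → Spec_preprocess_table_data data (preprocess_table_data data)

-- ===== LEMMAS AND PROOFS =====

-- Overwriting cells 0..k-1 of r0 in place equals a fresh k-cell prefix plus the untouched suffix.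
lemma pv_fold_set_eq_map (f : Nat → String) (r0 : List String) (k : Nat) (h : k ≤ r0.length) :
    (List.range k).foldl (fun row col => row.set col (f col)) r0
      = (List.range k).map f ++ r0.drop k := by
  induction k with
  | zero => simp
  | succ m ih =>
    have hm : m ≤ r0.length := by omega
    rw [List.range_succ, List.foldl_append, ih hm, List.map_append]
    have hlen : ((List.range m).map f).length = m := by simp
    rw [List.drop_eq_getElem_cons (by omega : m < r0.length)]
    simp only [List.foldl_cons, List.foldl_nil, List.map_cons, List.map_nil]
    rw [List.set_append_right _ _ (by omega), hlen]
    simp only [Nat.sub_self, List.set_cons_zero, List.append_assoc, List.singleton_append]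

-- The zipped comprehension over three long-enough rows equals the range-indexed map.
lemma pv_zip_eq_range (g : String → String → String → String) (a b c : List String) (k : Nat)
    (ha : k ≤ a.length) (hb : k ≤ b.length) (hc : k ≤ c.length) :
    ((a.take k).zip (b.zip c)).map (fun p => g p.1 p.2.1 p.2.2)
      = (List.range k).map (fun j => g (a.getD j "") (b.getD j "") (c.getD j "")) := by
  apply List.ext_getElem
  · simp; omega
  · intro j h1 h2
    have hj : j < k := by simpa using h2
    simp [List.getElem_zip, List.getD_eq_getElem?_getD,
      List.getElem?_eq_getElem (by omega : j < a.length),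
      List.getElem?_eq_getElem (by omega : j < b.length),
      List.getElem?_eq_getElem (by omega : j < c.length)]

-- A's in-place merged row equals B's zipped merged row on long-enough rows.
lemma pv_merge_eq (data : List (List String)) (k i : Nat)
    (ha : k ≤ (data.getD i []).length) (hb : k ≤ (data.getD (i+1) []).length)
    (hc : k ≤ (data.getD (i+2) []).length) :
    pvMergeRowA data k i = pvMergeRowB (data.getD i []) (data.getD (i+1) []) (data.getD (i+2) []) k := by
  unfold pvMergeRowA pvMergeRowB
  rw [pv_fold_set_eq_map _ _ _ ha,
    pv_zip_eq_range (fun x y z => if y = z then x else x ++ "\n" ++ y ++ "\n" ++ z) _ _ _ k ha hb hc]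

-- Once no full group of three remains, A appends the remaining rows one by one.
lemma pv_loopA_tail (data : List (List String)) (k : Nat) :
    ∀ d i acc, d = data.length - i → ¬ (i + 2 < data.length) → i ≤ data.length →
      pvLoopA data data.length k i acc = acc ++ data.drop i := by
  intro d
  induction d using Nat.strong_induction_on with
  | _ d ih =>
    intro i acc hd hno hle
    rw [pvLoopA]
    by_cases hi : i < data.length
    · simp only [hi, if_true, if_neg hno]
      rw [ih (data.length - (i+1)) (by omega) (i+1) _ rfl (by omega) (by omega)]
      rw [List.append_assoc]
      congr 1
      rw [List.drop_eq_getElem_cons hi]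
      simp [List.getElem?_eq_getElem hi]
    · simp only [hi, if_false]
      have : i = data.length := by omega
      simp [this]

-- drop i data = a :: rest  →  data.getD i [] = a
lemma pv_getD_of_drop (data : List (List String)) (i : Nat) (a : List String)
    (rest : List (List String)) (h : data.drop i = a :: rest) :
    data.getD i [] = a := by
  rw [List.getD_eq_getElem?_getD, ← List.head?_drop, h]; rfl

-- Main loop invariant: from a group start i, A produces B's recursive merge of the remaining rows.
lemma pv_loopA_main (data : List (List String)) (k : Nat)
    (hpre : ∀ i < data.length, i % 3 = 1 → i + 2 < data.length →
      k ≤ (data.getD i []).length ∧ k ≤ (data.getD (i+1) []).length ∧ k ≤ (data.getD (i+2) []).length) :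
    ∀ rows i acc, i % 3 = 1 → i ≤ data.length → data.drop i = rows →
      pvLoopA data data.length k i acc = acc ++ pvMergeGroupsB rows k := by
  intro rows
  induction rows using pvMergeGroupsB.induct with
  | case1 a b c rest ih =>
    intro i acc hmod hle hdrop
    have hg : i + 2 < data.length := by
      have := congrArg List.length hdrop
      simp [List.length_drop] at this; omega
    have ha := pv_getD_of_drop data i a _ hdrop
    have hdrop1 : data.drop (i+1) = b :: c :: rest := by
      rw [← List.drop_drop (i := 1) (j := i), hdrop]; rfl
    have hb := pv_getD_of_drop data (i+1) b _ hdrop1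
    have hdrop2 : data.drop (i+2) = c :: rest := by
      rw [← List.drop_drop (i := 1) (j := i+1), hdrop1]; rfl
    have hc := pv_getD_of_drop data (i+2) c _ hdrop2
    have hdrop3 : data.drop (i+3) = rest := by
      rw [← List.drop_drop (i := 1) (j := i+2), hdrop2]; rfl
    obtain ⟨ha', hb', hc'⟩ := hpre i (by omega) hmod hg
    rw [pvLoopA]
    simp only [if_pos (by omega : i < data.length), if_pos hg]
    rw [ih (i+3) _ (by omega) (by omega) hdrop3]
    rw [pv_merge_eq data k i ha' hb' hc', ha, hb, hc]
    simp [pvMergeGroupsB]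
  | case2 rows hshape =>
    intro i acc hmod hle hdrop
    have hlen : rows.length < 3 := by
      rcases rows with _ | ⟨a, _ | ⟨b, _ | ⟨c, rest⟩⟩⟩ <;> simp_all
      exact (hshape a b c rest rfl rfl rfl rfl).elim
    have hno : ¬ (i + 2 < data.length) := by
      have := congrArg List.length hdrop
      simp [List.length_drop] at this; omega
    rw [pv_loopA_tail data k (data.length - i) i acc rfl hno hle, hdrop]
    rcases rows with _ | ⟨a, _ | ⟨b, _ | ⟨c, rest⟩⟩⟩
    · rfl
    · rfl
    · rfl
    · exact (hshape a b c rest rfl).elim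

-- ===== VERDICT (by name: the statement is the Claim_ definition above) =====
theorem preprocess_table_data_spec : Claim_equal_preprocess_table_data := by
  intro data _hdom hpre
  unfold Spec_preprocess_table_data preprocess_table_data preprocess_table_data_alt
  match data with
  | [] => rfl
  | header :: rest =>
    have hpre' : ∀ i < (header :: rest).length, i % 3 = 1 → i + 2 < (header :: rest).length →
        header.length ≤ ((header :: rest).getD i []).length ∧
        header.length ≤ ((header :: rest).getD (i+1) []).length ∧
        header.length ≤ ((header :: rest).getD (i+2) []).length := by
      intro i h1 h2 h3; simpa using hpre i h1 h2 h3
    have := pv_loopA_main (header :: rest) header.length hpre' rest 1 [header]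
      (by omega) (by simp) (by simp)
    simpa using this
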